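-- pv_equiv track=rewrite | github.com/mandolinraman/Arithmetic-Encoder | arithmetic_coding_alt.py | divmod_abc
-- ===== SOURCE A (Python) =====
-- def divmod_abc(a, b, c):
--     """
--     Given three unsigned integers a, b, c such that a, b and 2*c - 1 fit in
--     L-bit registers, compute:
--
--         q = (a * b) // c and r = (a * b) % c
--
--     without overflowing using only L-bit registers for all arithmetic.
--     """
--
--     # It's slightly more efficient if b < a
--     if a < b:
--         return divmod_abc(b, a, c)
--
--     # Let k > 1 be an integer such that k * c - 1 doesn't overflow. We
--     # choose k = 2 which requires that 2 * c - 1 is an L-bit value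
--     k = 2
--     qm, rm = divmod(a, c)
--     q, r = 0, 0
--     m = b
--
--     # We want to maintain the invariant:
--     #     a * b / c = (q + r / c) + (qm + rm / c) * m
--     #     where 0 <= r, rm < c
--     while m > 0:
--         # Let m = k * t + s with 0 <= s < k:
--         (t, s) = divmod(m, k)
--
--         # Then,
--         #     a * b = (q + r/C) + (qm + rm / c) * (k * t + s)
--         #     = (q + qm * s) + (r + rm * s) / c + (qm * k + rm * k / c) * t
--         if s > 0:
--             r += rm * s  # won't overflow since r + rm * s < c * k
--             q += qm * s + r // c  # won't overflow because q <= q_final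
--             r = r % c
--
--         # At this point q and r have been modified so that we now have
--         # a * b / c = (q + r / c) + (qm * k + rm * k / c) * t
--         if t > 0:
--             # simplify the second term
--             rm *= k  # won't overflow since rm * k < c * k
--             qm = k * qm + rm // c  # won't overflow because qm * t <= q_final
--             rm = rm % c  # won't overflow
--
--         m = t
--
--         # At this point qm, rm and m have been modified so that
--         # we maintain the invariant:
--         #   a * b / c = (q + r / c) + (qm + rm / c) * m
--         #
--         # and m is now strictly smaller.
--
--     # # debug
--     # assert q == (a * b) // c
--     # assert r == (a * b) % c
--
--     return (q, r)
-- ===== SOURCE B (Python) =====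
-- def divmod_abc(a, b, c):
--     return divmod(a * b, c)
-- ===== Notes on version B (the rewrite author's own statement) =====
-- stated objective: simpler
-- what changed: Replaces the bit-serial double-and-reduce loop (written to avoid register overflow) with Python's arbitrary-precision closed form divmod(a*b, c).
-- outside the precondition, e.g. on divmod_abc(-2, 3, 5): A returns (0, 0), B returns (-2, 4); on divmod_abc(3, -2, 5): A returns (0, 0), B returns (-2, 4)
import Mathlib
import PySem

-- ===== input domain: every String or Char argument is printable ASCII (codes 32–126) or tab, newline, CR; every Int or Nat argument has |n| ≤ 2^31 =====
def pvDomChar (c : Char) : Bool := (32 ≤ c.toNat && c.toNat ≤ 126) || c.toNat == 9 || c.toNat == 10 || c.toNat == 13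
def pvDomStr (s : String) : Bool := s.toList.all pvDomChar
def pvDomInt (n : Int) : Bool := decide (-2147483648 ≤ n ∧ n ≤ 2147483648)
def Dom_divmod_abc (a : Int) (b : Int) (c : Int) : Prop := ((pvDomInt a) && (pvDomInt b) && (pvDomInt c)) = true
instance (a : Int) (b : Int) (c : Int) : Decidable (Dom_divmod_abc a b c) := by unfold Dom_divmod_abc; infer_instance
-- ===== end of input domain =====

-- B replaces A's bit-serial overflow-avoiding double-and-reduce loop with the closed form divmod(a*b, c) (simpler; Python ints cannot overflow).


-- ===== PORT A =====
-- the 'while m > 0' loop, state (q, r, qm, rm, m); k = 2 is inlined as in the source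
def divmodLoop (c q r qm rm m : Int) : Int × Int :=
  if 0 < m then
    let t := PySem.Int.floordiv m 2
    let s := PySem.Int.mod m 2
    let qr := if 0 < s then
        let r1 := r + rm * s                                 -- r += rm * s
        (q + qm * s + PySem.Int.floordiv r1 c,               -- q += qm * s + r // c
         PySem.Int.mod r1 c)                                 -- r = r % c
      else (q, r)
    let qmrm := if 0 < t then
        let rm1 := rm * 2                                    -- rm *= k
        (2 * qm + PySem.Int.floordiv rm1 c,                  -- qm = k * qm + rm // c
         PySem.Int.mod rm1 c)                                -- rm = rm % c
      else (qm, rm)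
    divmodLoop c qr.1 qr.2 qmrm.1 qmrm.2 t                   -- m = t
  else (q, r)
termination_by m.toNat
decreasing_by
  rw [PySem.Int.floordiv_eq_ediv_of_pos (by omega : (0:Int) < 2)]; omega

-- body after the 'if a < b' swap: qm, rm = divmod(a, c); q, r = 0, 0; m = b; loop
def divmodBody (a b c : Int) : Int × Int :=
  divmodLoop c 0 0 (PySem.Int.floordiv a c) (PySem.Int.mod a c) b

def divmod_abc (a : Int) (b : Int) (c : Int) : Int × Int :=
  if a < b then divmodBody b a c else divmodBody a b c       -- 'if a < b: return divmod_abc(b, a, c)'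

-- ===== PORT B =====
def divmod_abc_alt (a : Int) (b : Int) (c : Int) : Int × Int :=
  (PySem.Int.floordiv (a * b) c, PySem.Int.mod (a * b) c)    -- return divmod(a * b, c)

-- ===== PRECONDITION & SPEC =====
-- Pre_ excludes c = 0, where A raises ZeroDivisionError in divmod(a, c), and inputs with a negative
-- factor and nonzero product, outside the docstring's unsigned domain ("three unsigned integers"):
-- there the loop body never runs and A's returned (0, 0) is an artefact of the implementation, not a*b divmod c.
def Pre_divmod_abc (a : Int) (b : Int) (c : Int) : Prop := ((0 ≤ a ∧ 0 ≤ b) ∨ a * b = 0) ∧ c ≠ 0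
instance (a : Int) (b : Int) (c : Int) : Decidable (Pre_divmod_abc a b c) := by unfold Pre_divmod_abc; infer_instance
def pvWitness_divmod_abc : Int × Int × Int := (6, 4, 5)

def Spec_divmod_abc (a : Int) (b : Int) (c : Int) (out : Int × Int) : Prop := out = divmod_abc_alt a b c
instance (a : Int) (b : Int) (c : Int) (out : Int × Int) : Decidable (Spec_divmod_abc a b c out) := by unfold Spec_divmod_abc; infer_instance

-- ===== CLAIM (what is proved, stated in full; the proofs are below) =====
def Claim_equal_divmod_abc : Prop := ∀ (a : Int) (b : Int) (c : Int), Dom_divmod_abc a b c → Pre_divmod_abc a b c → Spec_divmod_abc a b c (divmod_abc a b c)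

-- ===== LEMMAS AND PROOFS =====

-- 'r is a valid Python remainder for divisor c' (sign of the divisor)
def Bnd (c r : Int) : Prop := (0 < c ∧ 0 ≤ r ∧ r < c) ∨ (c < 0 ∧ c < r ∧ r ≤ 0)

theorem bnd_zero (c : Int) (hc : c ≠ 0) : Bnd c 0 := by
  rcases lt_or_gt_of_ne hc with h | h
  · exact Or.inr ⟨h, h, le_rfl⟩
  · exact Or.inl ⟨h, le_rfl, h⟩

theorem loop_nonpos (c q r qm rm m : Int) (hm : m ≤ 0) :
    divmodLoop c q r qm rm m = (q, r) := by
  rw [divmodLoop]; simp [show ¬ 0 < m by omega]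

theorem bnd_mod (c x : Int) (hc : c ≠ 0) : Bnd c (PySem.Int.mod x c) := by
  rcases lt_or_gt_of_ne hc with h | h
  · exact Or.inr ⟨h, (PySem.Int.mod_neg_bounds x h).1, (PySem.Int.mod_neg_bounds x h).2⟩
  · exact Or.inl ⟨h, PySem.Int.mod_nonneg x h, PySem.Int.mod_lt x h⟩

-- uniqueness of floor quotient/remainder: if r is a valid remainder, floordiv/mod of q*c + r recover q and r
theorem key (c q r : Int) (hc : c ≠ 0) (hb : Bnd c r) :
    PySem.Int.floordiv (q * c + r) c = q ∧ PySem.Int.mod (q * c + r) c = r := by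
  have h := PySem.Int.floordiv_mul_add_mod (q * c + r) c
  have hb' := bnd_mod c (q * c + r) hc
  set d := PySem.Int.floordiv (q * c + r) c with hd
  set m' := PySem.Int.mod (q * c + r) c with hm
  have hlin : c * (d - q) = r - m' := by linear_combination h
  have hdvd : |c| ∣ (r - m') := (abs_dvd _ _).mpr ⟨d - q, hlin.symm⟩
  have habs : |r - m'| < |c| := by
    rcases abs_cases c with ⟨he, hsgn⟩ | ⟨he, hsgn⟩ <;>
      rw [he, abs_lt] <;>
        rcases hb with ⟨h1, h2, h3⟩ | ⟨h1, h2, h3⟩ <;>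
          rcases hb' with ⟨g1, g2, g3⟩ | ⟨g1, g2, g3⟩ <;> omega
  have h0 : r - m' = 0 := Int.eq_zero_of_abs_lt_dvd hdvd habs
  have hm0 : m' = r := by omega
  have hq : d = q := by
    have : c * (d - q) = 0 := by omega
    rcases mul_eq_zero.mp this with h | h
    · exact absurd h hc
    · omega
  exact ⟨hq, hm0⟩

-- loop invariant: divmodLoop computes floordiv/mod of N = q*c + r + (qm*c + rm)*m
theorem loop_spec (c : Int) (hc : c ≠ 0) : ∀ (n : Nat) (q r qm rm m : Int),
    m.toNat ≤ n → 0 ≤ m → Bnd c r → Bnd c rm →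
    divmodLoop c q r qm rm m =
      (PySem.Int.floordiv (q * c + r + (qm * c + rm) * m) c,
       PySem.Int.mod (q * c + r + (qm * c + rm) * m) c) := by
  intro n
  induction n with
  | zero =>
      intro q r qm rm m hn hm hr hrm
      have hm0 : m = 0 := by omega
      subst hm0
      rw [divmodLoop]
      simp only [lt_irrefl, if_false, mul_zero, add_zero]
      exact Prod.ext (key c q r hc hr).1.symm (key c q r hc hr).2.symm
  | succ n ih =>
      intro q r qm rm m hn hm hr hrm
      by_cases hmp : 0 < m
      · rw [divmodLoop]
        simp only [if_pos hmp]
        have hts := PySem.Int.floordiv_mul_add_mod m 2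
        have hs0 : 0 ≤ PySem.Int.mod m 2 := PySem.Int.mod_nonneg m (by omega)
        have hs2 : PySem.Int.mod m 2 < 2 := PySem.Int.mod_lt m (by omega)
        set t := PySem.Int.floordiv m 2 with htdef
        set s := PySem.Int.mod m 2 with hsdef
        have ht0 : 0 ≤ t := by omega
        have htn : t.toNat ≤ n := by omega
        -- the two conditional updates preserve the decomposition and the bounds
        set qr := if 0 < s then
            (q + qm * s + PySem.Int.floordiv (r + rm * s) c, PySem.Int.mod (r + rm * s) c)
          else (q, r) with hqr
        set qmrm := if 0 < t then
            (2 * qm + PySem.Int.floordiv (rm * 2) c, PySem.Int.mod (rm * 2) c)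
          else (qm, rm) with hqmrm
        have hqr1 : qr.1 * c + qr.2 = q * c + r + (qm * c + rm) * s ∧ Bnd c qr.2 := by
          by_cases hs : 0 < s
          · have h1 := PySem.Int.floordiv_mul_add_mod (r + rm * s) c
            rw [hqr]; simp only [if_pos hs]
            exact ⟨by linear_combination h1, bnd_mod c _ hc⟩
          · have hs0' : s = 0 := by omega
            rw [hqr]; simp only [hs0', mul_zero, add_zero]
            exact ⟨rfl, hr⟩
        have hqm1 : 0 < t → qmrm.1 * c + qmrm.2 = 2 * (qm * c + rm) := by
          intro htp
          have h1 := PySem.Int.floordiv_mul_add_mod (rm * 2) c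
          rw [hqmrm]; simp only [if_pos htp]
          linear_combination h1
        have hqm2 : Bnd c qmrm.2 := by
          by_cases htp : 0 < t
          · rw [hqmrm]; simp only [if_pos htp]; exact bnd_mod c _ hc
          · rw [hqmrm]; simp only [if_neg htp]; exact hrm
        rw [ih qr.1 qr.2 qmrm.1 qmrm.2 t htn ht0 hqr1.2 hqm2]
        -- the number being decomposed is unchanged
        have hN : qr.1 * c + qr.2 + (qmrm.1 * c + qmrm.2) * t
            = q * c + r + (qm * c + rm) * m := by
          by_cases htp : 0 < t
          · rw [hqr1.1, hqm1 htp]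
            have hms : m = 2 * t + s := by omega
            rw [hms]; ring
          · have ht0' : t = 0 := by omega
            have hms : m = s := by omega
            rw [ht0', hms, hqr1.1]; ring
        rw [hN]
      · have hm0 : m = 0 := by omega
        subst hm0
        rw [divmodLoop]
        simp only [lt_irrefl, if_false, mul_zero, add_zero]
        exact Prod.ext (key c q r hc hr).1.symm (key c q r hc hr).2.symm

theorem body_spec (a b c : Int) (hb : 0 ≤ b) (hc : c ≠ 0) :
    divmodBody a b c = (PySem.Int.floordiv (a * b) c, PySem.Int.mod (a * b) c) := by
  unfold divmodBody
  rw [loop_spec c hc b.toNat 0 0 (PySem.Int.floordiv a c) (PySem.Int.mod a c) b le_rfl hb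
      (bnd_zero c hc) (bnd_mod c a hc)]
  have ha := PySem.Int.floordiv_mul_add_mod a c
  rw [show (0 : Int) * c + 0 + (PySem.Int.floordiv a c * c + PySem.Int.mod a c) * b = a * b by
    rw [ha]; ring]

-- ===== VERDICT (by name: the statement is the Claim_ definition above) =====
theorem divmod_abc_spec : Claim_equal_divmod_abc := by
  intro a b c _ hpre
  obtain ⟨hor, hc⟩ := hpre
  unfold Spec_divmod_abc
  rcases hor with ⟨ha, hb⟩ | hab0
  · unfold divmod_abc divmod_abc_alt
    by_cases hab : a < b
    · rw [if_pos hab, body_spec b a c ha hc, mul_comm]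
    · rw [if_neg hab, body_spec a b c hb hc]
  · -- a * b = 0: the loop is entered with m ≤ 0, so A returns (0, 0) = divmod(0, c)
    have halt : divmod_abc_alt a b c = (0, 0) := by
      have k := key c 0 0 hc (bnd_zero c hc)
      simp only [zero_mul, add_zero] at k
      unfold divmod_abc_alt
      rw [hab0, k.1, k.2]
    rw [halt]
    rcases mul_eq_zero.mp hab0 with h | h <;> subst h <;>
      unfold divmod_abc divmodBody <;> split <;>
        exact loop_nonpos _ _ _ _ _ _ (by omega)
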